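-- pv_equiv track=rewrite | github.com/prgpascal/advent-of-code | year_2022/day_25/solution.py | replace_with_snafu_special_chars
-- ===== SOURCE A (Python) =====
-- from collections import deque
--
-- def replace_with_snafu_special_chars(number: str) -> str:
--     result = deque(number)
--     for i in range(len(number) - 1, -1, -1):
--         if not number[i].isdigit():
--             # it's a special char, skip
--             continue
--
--         match number[i]:
--             case "5":
--                 result[i] = "0"
--             case "3":
--                 result[i] = "="
--             case "4":
--                 result[i] = "-"
--             case _:
--                 continue
--
--         if i == 0:
--             result.appendleft("1")
--         else:
--             result[i - 1] = str(int(result[i - 1]) + 1)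
--
--         return replace_with_snafu_special_chars("".join(result))
--
--     return number
-- ===== SOURCE B (Python) =====
-- def replace_with_snafu_special_chars(number: str) -> str:
--     out = []  # output characters, collected right-to-left
--     carry = 0
--     for ch in reversed(number):
--         if '0' <= ch <= '9':
--             d = ord(ch) - 48 + carry
--             if d == 3:
--                 out.append('=')
--                 carry = 1
--             elif d == 4:
--                 out.append('-')
--                 carry = 1
--             elif d == 5:
--                 out.append('0')
--                 carry = 1
--             else:
--                 out.extend(reversed(str(d)))
--                 carry = 0
--         else:
--             out.append(ch)
--             carry = 0
--     if carry:
--         out.append('1')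
--     return ''.join(reversed(out))
-- ===== Notes on version B (the rewrite author's own statement) =====
-- stated objective: alternative
-- what changed: A repeatedly rescans the whole string for the rightmost 3/4/5 digit, rewrites one position and recurses from scratch; B does one right-to-left pass maintaining a carry.
import Mathlib
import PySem

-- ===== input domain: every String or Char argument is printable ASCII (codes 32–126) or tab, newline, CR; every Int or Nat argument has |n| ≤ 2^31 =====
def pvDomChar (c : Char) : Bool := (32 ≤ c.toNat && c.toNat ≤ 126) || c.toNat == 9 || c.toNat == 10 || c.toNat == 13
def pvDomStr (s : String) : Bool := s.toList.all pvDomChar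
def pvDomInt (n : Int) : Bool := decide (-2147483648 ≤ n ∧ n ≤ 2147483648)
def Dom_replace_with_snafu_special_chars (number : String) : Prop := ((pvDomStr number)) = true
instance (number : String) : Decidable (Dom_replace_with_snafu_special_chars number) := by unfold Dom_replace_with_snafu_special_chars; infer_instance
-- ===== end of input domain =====

-- B replaces A's rescan-and-recurse (find the rightmost 3/4/5 digit, rewrite, start over)
-- by a single right-to-left pass that maintains the carry; equivalence is proved on Pre_
-- (the inputs where A returns instead of raising ValueError).

-- ===== PORT A =====
-- '3'/'4'/'5' are the digits A's match statement rewrites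
def pvIs345 (c : Char) : Bool := c == '3' || c == '4' || c == '5'

-- the replacement character A's match assigns (case "5" → "0", "3" → "=", "4" → "-")
def pvMap345 (c : Char) : Char := if c == '5' then '0' else if c == '3' then '=' else '-'

-- what A does once the match hits at position i: `rest` is the part left of i reversed
-- (head = result[i-1]), `suffFull` the part right of i in order.  int(result[i-1]) is
-- PySem.Int.ofChars? (none = ValueError); str(… + 1) is PySem.Int.toChars.
def pvMkRes (x : Char) (rest suffFull : List Char) : Option (List Char) :=
  match rest with
  | [] => some ('1' :: pvMap345 x :: suffFull)                  -- i == 0: appendleft("1")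
  | c :: rr =>
    match PySem.Int.ofChars? [c] with
    | some v => some (rr.reverse ++ PySem.Int.toChars (v + 1) ++ pvMap345 x :: suffFull)
    | none => none                                              -- ValueError
-- A's for-loop over i = len-1 … 0: scan the reversed chars, accumulating the already
-- scanned suffix; none = the loop fell through (A returns number unchanged),
-- some none = ValueError, some (some l') = A recurses on l'.
def pvAStep : List Char → List Char → Option (Option (List Char))
  | [], _ => none
  | ch :: rest, suff =>
    if PySem.Chars.isdigit ch then
      if pvIs345 ch then some (pvMkRes ch rest suff)
      else pvAStep rest (ch :: suff)                            -- default case: continue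
    else pvAStep rest (ch :: suff)                              -- not a digit: continue

def pvCnt (l : List Char) : Nat := l.countP (fun c => pvIs345 c)

-- termination measure for A's recursion: Σ over positions i with a 3/4/5 digit of (i+1)
def pvPhi : List Char → Nat
  | [] => 0
  | c :: t => pvCnt (c :: t) + pvPhi t

-- A's top-level recursion; the `if` is only a totality guard (it is proved to hold
-- whenever this point is reached on an input A returns on)
def pvARec (l : List Char) : Option (List Char) :=
  match pvAStep l.reverse [] with
  | none => some l
  | some none => none
  | some (some l') =>
    if _h : pvPhi l' < pvPhi l then pvARec l' else none
termination_by pvPhi l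

def replace_with_snafu_special_chars (number : String) : String :=
  match pvARec number.toList with
  | some l => String.mk l
  | none => ""   -- A raises ValueError here; these inputs are excluded by Pre_

-- ===== PORT B =====
-- one loop iteration of Source B ('0' <= ch <= '9' test, carry, append to out)
def pvBStep (st : List Char × Int) (ch : Char) : List Char × Int :=
  if decide ('0' ≤ ch) && decide (ch ≤ '9') then
    let d : Int := (ch.toNat : Int) - 48 + st.2
    if d == 3 then (st.1 ++ ['='], 1)
    else if d == 4 then (st.1 ++ ['-'], 1)
    else if d == 5 then (st.1 ++ ['0'], 1)
    else (st.1 ++ (PySem.Int.toChars d).reverse, 0)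
  else (st.1 ++ [ch], 0)

def replace_with_snafu_special_chars_alt (number : String) : String :=
  let st := number.toList.reverse.foldl pvBStep ([], 0)
  let out := if st.2 == 1 then st.1 ++ ['1'] else st.1
  String.mk out.reverse

-- ===== PRECONDITION & SPEC =====
-- carry produced by a suffix, scanned right to left with incoming carry `cin`
def pvCarryB : List Char → Bool → Bool
  | [], cin => cin
  | ch :: t, cin =>
    PySem.Chars.isdigit ch &&
      (decide (3 ≤ (ch.toNat : Int) - 48 + (if pvCarryB t cin then 1 else 0) ∧
               (ch.toNat : Int) - 48 + (if pvCarryB t cin then 1 else 0) ≤ 5))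

-- no position holds a non-digit character that receives a carry from its right
def pvOkB : List Char → Bool → Bool
  | [], _ => true
  | ch :: t, cin => (PySem.Chars.isdigit ch || !pvCarryB t cin) && pvOkB t cin

-- Pre_ excludes exactly the inputs on which A raises ValueError: a carry propagates
-- into a non-digit character, making A compute int(<non-digit>).
def Pre_replace_with_snafu_special_chars (number : String) : Prop :=
  pvOkB number.toList false = true
instance (number : String) : Decidable (Pre_replace_with_snafu_special_chars number) := by
  unfold Pre_replace_with_snafu_special_chars; infer_instance

def pvWitness_replace_with_snafu_special_chars : String := "12345"

def Spec_replace_with_snafu_special_chars (number : String) (out : String) : Prop :=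
  out = replace_with_snafu_special_chars_alt number
instance (number : String) (out : String) : Decidable (Spec_replace_with_snafu_special_chars number out) := by
  unfold Spec_replace_with_snafu_special_chars; infer_instance

-- ===== CLAIM (what is proved, stated in full; the proofs are below) =====
def Claim_equal_replace_with_snafu_special_chars : Prop := ∀ (number : String), Dom_replace_with_snafu_special_chars number → Pre_replace_with_snafu_special_chars number → Spec_replace_with_snafu_special_chars number (replace_with_snafu_special_chars number)

-- ===== LEMMAS AND PROOFS =====

-- proof-side model of B: structural recursion from the right, output in forward order
def pvStep1 (ch : Char) (cin : Int) : List Char × Int :=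
  if PySem.Chars.isdigit ch then
    let d : Int := (ch.toNat : Int) - 48 + cin
    if d = 3 then (['='], 1)
    else if d = 4 then (['-'], 1)
    else if d = 5 then (['0'], 1)
    else (PySem.Int.toChars d, 0)
  else ([ch], 0)

def pvGo : List Char → Int → List Char × Int
  | [], cin => ([], cin)
  | ch :: t, cin =>
    let p := pvGo t cin
    let q := pvStep1 ch p.2
    (q.1 ++ p.1, q.2)

def pvB (l : List Char) : List Char :=
  let p := pvGo l 0
  if p.2 = 1 then '1' :: p.1 else p.1


lemma pvDigitCases (c : Char) (h : PySem.Chars.isdigit c = true) :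
    c = '0' ∨ c = '1' ∨ c = '2' ∨ c = '3' ∨ c = '4' ∨ c = '5' ∨ c = '6' ∨ c = '7' ∨ c = '8' ∨ c = '9' := by
  have hx : (decide ('0' ≤ c) && decide (c ≤ '9')) = true := h
  simp only [Bool.and_eq_true, decide_eq_true_eq] at hx
  have h2 : 48 ≤ c.toNat := Fin.mk_le_mk.mp hx.1
  have h3 : c.toNat ≤ 57 := Fin.mk_le_mk.mp hx.2
  have hc : c = Char.ofNat c.toNat := (Char.ofNat_toNat c).symm
  set n := c.toNat with hn
  interval_cases n <;> (rw [hc]; decide)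

lemma pv345Cases (x : Char) (h : pvIs345 x = true) : x = '3' ∨ x = '4' ∨ x = '5' := by
  simpa [pvIs345, or_assoc] using h

lemma pvNot345_of_notdigit (c : Char) (hd : PySem.Chars.isdigit c = false) :
    pvIs345 c = false := by
  cases hq : pvIs345 c
  · rfl
  · rcases pv345Cases c hq with rfl | rfl | rfl <;> exact absurd hd (by decide)

-- per-digit facts, all established by the ten cases of pvDigitCases
set_option maxRecDepth 4096 in
lemma pvDigitFacts (c : Char) (h : PySem.Chars.isdigit c = true) :
    PySem.Int.ofChars? [c] = some ((c.toNat : Int) - 48) ∧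
    pvGo (PySem.Int.toChars ((c.toNat : Int) - 48 + 1)) 0 = pvStep1 c 1 ∧
    pvCarryB (PySem.Int.toChars ((c.toNat : Int) - 48 + 1)) false = pvCarryB [c] true ∧
    (PySem.Int.toChars ((c.toNat : Int) - 48 + 1)).all PySem.Chars.isdigit = true ∧
    pvCnt (PySem.Int.toChars ((c.toNat : Int) - 48 + 1)) ≤ 1 ∧
    pvPhi (PySem.Int.toChars ((c.toNat : Int) - 48 + 1)) ≤ 1 := by
  rcases pvDigitCases c h with rfl|rfl|rfl|rfl|rfl|rfl|rfl|rfl|rfl|rfl <;>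
    exact ⟨by decide, by decide, by decide, by decide, by decide, by decide⟩

lemma pvStep1_plain (ch : Char) (h : pvIs345 ch = false) : pvStep1 ch 0 = ([ch], 0) := by
  by_cases hd : PySem.Chars.isdigit ch = true
  · rcases pvDigitCases ch hd with rfl|rfl|rfl|rfl|rfl|rfl|rfl|rfl|rfl|rfl <;> (revert h; decide)
  · have hd' : PySem.Chars.isdigit ch = false := by simpa using hd
    simp [pvStep1, hd']

lemma pvCarryB_cons_false (ch : Char) (t : List Char) (cin : Bool)
    (ht : pvCarryB t cin = false) (h : pvIs345 ch = false) :
    pvCarryB (ch :: t) cin = false := by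
  by_cases hd : PySem.Chars.isdigit ch = true
  · rcases pvDigitCases ch hd with rfl|rfl|rfl|rfl|rfl|rfl|rfl|rfl|rfl|rfl <;>
      first
      | exact absurd h (by decide)
      | (simp [pvCarryB, ht])
  · have hd' : PySem.Chars.isdigit ch = false := by simpa using hd
    simp [pvCarryB, hd']

lemma pvMFacts (x : Char) (h : pvIs345 x = true) :
    PySem.Chars.isdigit x = true ∧
    pvIs345 (pvMap345 x) = false ∧
    pvStep1 x 0 = ([pvMap345 x], 1) ∧
    pvCarryB [x] false = true := by
  rcases pv345Cases x h with rfl | rfl | rfl <;>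
    exact ⟨by decide, by decide, by decide, by decide⟩

-- list-shape lemmas
lemma pvGo_append (u v : List Char) (cin : Int) :
    pvGo (u ++ v) cin = ((pvGo u (pvGo v cin).2).1 ++ (pvGo v cin).1, (pvGo u (pvGo v cin).2).2) := by
  induction u with
  | nil => simp [pvGo]
  | cons a u ih => simp [pvGo, ih]

lemma pvGo_no345 (l : List Char) (h : ∀ c ∈ l, pvIs345 c = false) : pvGo l 0 = (l, 0) := by
  induction l with
  | nil => rfl
  | cons a t ih =>
    have h1 := pvStep1_plain a (h a (by simp))
    have h2 := ih (fun c hc => h c (by simp [hc]))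
    simp [pvGo, h1, h2]

lemma pvCarryB_append (u v : List Char) (cin : Bool) :
    pvCarryB (u ++ v) cin = pvCarryB u (pvCarryB v cin) := by
  induction u with
  | nil => simp [pvCarryB]
  | cons a u ih => simp [pvCarryB, ih]

lemma pvOkB_append (u v : List Char) (cin : Bool) :
    pvOkB (u ++ v) cin = (pvOkB u (pvCarryB v cin) && pvOkB v cin) := by
  induction u with
  | nil => simp [pvOkB]
  | cons a u ih => simp [pvOkB, pvCarryB_append, ih, Bool.and_assoc]

lemma pvCarryB_no345 (l : List Char) (h : ∀ c ∈ l, pvIs345 c = false) :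
    pvCarryB l false = false := by
  induction l with
  | nil => rfl
  | cons a t ih =>
    exact pvCarryB_cons_false a t false (ih (fun c hc => h c (by simp [hc]))) (h a (by simp))

lemma pvOkB_no345 (l : List Char) (h : ∀ c ∈ l, pvIs345 c = false) :
    pvOkB l false = true := by
  induction l with
  | nil => rfl
  | cons a t ih =>
    have h1 := pvCarryB_no345 t (fun c hc => h c (by simp [hc]))
    have h2 := ih (fun c hc => h c (by simp [hc]))
    simp [pvOkB, h1, h2]

lemma pvOkB_digits (l : List Char) (cin : Bool) (h : ∀ c ∈ l, PySem.Chars.isdigit c = true) :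
    pvOkB l cin = true := by
  induction l with
  | nil => rfl
  | cons a t ih =>
    have h2 := ih (fun c hc => h c (by simp [hc]))
    simp [pvOkB, h a (by simp), h2]

lemma pvCnt_no345 (l : List Char) (h : ∀ c ∈ l, pvIs345 c = false) : pvCnt l = 0 := by
  simp only [pvCnt, List.countP_eq_zero]
  intro a ha
  simp [h a ha]

lemma pvPhi_no345 (l : List Char) (h : ∀ c ∈ l, pvIs345 c = false) : pvPhi l = 0 := by
  induction l with
  | nil => rfl
  | cons a t ih =>
    have h2 := ih (fun c hc => h c (by simp [hc]))
    simp [pvPhi, pvCnt_no345 _ h, h2]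

lemma pvCnt_append (u v : List Char) : pvCnt (u ++ v) = pvCnt u + pvCnt v := by
  simp [pvCnt, List.countP_append]

lemma pvPhi_append (u v : List Char) :
    pvPhi (u ++ v) = pvPhi u + u.length * pvCnt v + pvPhi v := by
  induction u with
  | nil => simp [pvPhi]
  | cons a u ih =>
    have h1 : pvCnt (a :: (u ++ v)) = pvCnt (a :: u) + pvCnt v := by
      simp [pvCnt, List.countP_cons, List.countP_append]
      split <;> ring
    simp only [List.cons_append, pvPhi, ih, h1, List.length_cons]
    ring

lemma pvCnt_cons (c : Char) (t : List Char) :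
    pvCnt (c :: t) = (if pvIs345 c then 1 else 0) + pvCnt t := by
  cases h : pvIs345 c <;> simp [pvCnt, h, Nat.add_comm]

-- A's loop fell through: no 3/4/5 digit anywhere
lemma pvAStep_none : ∀ (rev suff : List Char), pvAStep rev suff = none →
    ∀ c ∈ rev, pvIs345 c = false := by
  intro rev
  induction rev with
  | nil => intro suff h c hc; cases hc
  | cons ch rest ih =>
    intro suff h c hc
    simp only [pvAStep] at h
    by_cases hd : PySem.Chars.isdigit ch = true
    · rw [if_pos hd] at h
      by_cases h3 : pvIs345 ch = true
      · rw [if_pos h3] at h; cases h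
      · rw [if_neg h3] at h
        rcases List.mem_cons.mp hc with rfl | hc'
        · exact Bool.eq_false_iff.mpr h3
        · exact ih _ h _ hc'
    · rw [if_neg hd] at h
      rcases List.mem_cons.mp hc with rfl | hc'
      · exact pvNot345_of_notdigit c (by simpa using hd)
      · exact ih _ h _ hc'

-- inversion of A's loop: where the match hit and what A rebuilt
lemma pvAStep_shape : ∀ (rev suff : List Char) (r : Option (List Char)),
    pvAStep rev suff = some r →
    ∃ s x rest, rev = s ++ x :: rest ∧ (∀ c ∈ s, pvIs345 c = false) ∧ pvIs345 x = true ∧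
      r = pvMkRes x rest (s.reverse ++ suff) := by
  intro rev
  induction rev with
  | nil => intro suff r h; cases h
  | cons ch rest ih =>
    intro suff r h
    simp only [pvAStep] at h
    by_cases hd : PySem.Chars.isdigit ch = true
    · rw [if_pos hd] at h
      by_cases h3 : pvIs345 ch = true
      · rw [if_pos h3] at h
        obtain rfl := (Option.some.inj h).symm
        exact ⟨[], ch, rest, rfl, by simp, h3, by simp⟩
      · rw [if_neg h3] at h
        obtain ⟨s, x, rest', hrev, hs, hx, hr⟩ := ih (ch :: suff) r h
        refine ⟨ch :: s, x, rest', by simp [hrev], ?_, hx, ?_⟩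
        · intro c hc
          rcases List.mem_cons.mp hc with rfl | hc'
          · exact Bool.eq_false_iff.mpr h3
          · exact hs c hc'
        · rw [hr]
          simp
    · rw [if_neg hd] at h
      obtain ⟨s, x, rest', hrev, hs, hx, hr⟩ := ih (ch :: suff) r h
      refine ⟨ch :: s, x, rest', by simp [hrev], ?_, hx, ?_⟩
      · intro c hc
        rcases List.mem_cons.mp hc with rfl | hc'
        · exact pvNot345_of_notdigit c (by simpa using hd)
        · exact hs c hc'
      · rw [hr]
        simp

-- bridge: the foldl in port B computes pvGo
lemma pvBStep_eq (o : List Char) (c : Int) (ch : Char) :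
    pvBStep (o, c) ch = (o ++ ((pvStep1 ch c).1).reverse, (pvStep1 ch c).2) := by
  by_cases hd : PySem.Chars.isdigit ch = true
  · have hd2 : (decide ('0' ≤ ch) && decide (ch ≤ '9')) = true := hd
    simp only [pvBStep, pvStep1, hd, hd2, if_true, beq_iff_eq]
    split_ifs <;> simp
  · have hd' : PySem.Chars.isdigit ch = false := by simpa using hd
    have hd2 : (decide ('0' ≤ ch) && decide (ch ≤ '9')) = false := hd'
    simp [pvBStep, pvStep1, hd', hd2]

lemma pvFoldl (l : List Char) (acc : List Char) (c : Int) :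
    List.foldl pvBStep (acc, c) l.reverse = (acc ++ ((pvGo l c).1).reverse, (pvGo l c).2) := by
  induction l generalizing acc c with
  | nil => simp [pvGo]
  | cons ch t ih =>
    rw [List.reverse_cons, List.foldl_append]
    simp [ih, pvGo, pvBStep_eq]

lemma pvAlt_eq (number : String) :
    replace_with_snafu_special_chars_alt number = String.mk (pvB number.toList) := by
  unfold replace_with_snafu_special_chars_alt pvB
  rw [pvFoldl number.toList [] 0]
  by_cases h2 : (pvGo number.toList 0).2 = 1
  · simp [h2]
  · have h3 : ((pvGo number.toList 0).2 == 1) = false := by simpa using h2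
    simp [h2, h3]

-- the main induction: on inputs where no carry meets a non-digit, A's rewrite
-- cascade terminates and produces exactly B's single pass
lemma pvMain : ∀ (n : Nat) (l : List Char), pvPhi l = n → pvOkB l false = true →
    pvARec l = some (pvB l) := by
  intro n
  induction n using Nat.strong_induction_on with
  | _ n IH =>
    intro l hn hok
    rw [pvARec]
    cases hstep : pvAStep l.reverse [] with
    | none =>
      have hall : ∀ c ∈ l, pvIs345 c = false := fun c hc =>
        pvAStep_none l.reverse [] hstep c (List.mem_reverse.mpr hc)
      show some l = some (pvB l)
      rw [show pvB l = l by simp [pvB, pvGo_no345 l hall]]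
    | some r =>
      obtain ⟨s, x, rest, hrev, hs, hx, hr⟩ := pvAStep_shape l.reverse [] r hstep
      have hl : l = rest.reverse ++ (x :: s.reverse) := by
        have h0 := congrArg List.reverse hrev
        simpa [List.reverse_append] using h0
      have hsr : ∀ c ∈ s.reverse, pvIs345 c = false := fun c hc => hs c (List.mem_reverse.mp hc)
      obtain ⟨hxd, hm345, hxstep, hxcarry⟩ := pvMFacts x hx
      have hcx : pvCarryB (x :: s.reverse) false = true := by
        have : (x :: s.reverse) = [x] ++ s.reverse := rfl
        rw [this, pvCarryB_append, pvCarryB_no345 _ hsr, hxcarry]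
      cases rest with
      | nil =>
        -- i == 0: A prepends '1'; both sides give '1' :: map(x) :: suffix
        simp only [pvMkRes, List.append_nil] at hr
        have hall' : ∀ ch ∈ ('1' :: pvMap345 x :: s.reverse), pvIs345 ch = false := by
          intro ch hch
          rcases List.mem_cons.mp hch with rfl | hch'
          · decide
          · rcases List.mem_cons.mp hch' with rfl | hch''
            · exact hm345
            · exact hsr ch hch''
        cases hr' : r with
        | none => rw [hr'] at hr; cases hr
        | some l' =>
          rw [hr'] at hr
          obtain rfl := Option.some.inj hr
          have hphi1 : pvPhi l = 1 := by
            rw [hl]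
            simp [pvPhi, pvCnt_cons, hx, pvCnt_no345 _ hsr, pvPhi_no345 _ hsr]
          have hphi0 : pvPhi ('1' :: pvMap345 x :: s.reverse) = 0 := pvPhi_no345 _ hall'
          have hlt : pvPhi ('1' :: pvMap345 x :: s.reverse) < pvPhi l := by omega
          show (if _h : pvPhi ('1' :: pvMap345 x :: s.reverse) < pvPhi l then
              pvARec ('1' :: pvMap345 x :: s.reverse) else none) = some (pvB l)
          rw [dif_pos hlt,
            IH (pvPhi ('1' :: pvMap345 x :: s.reverse)) (by omega) _ rfl (pvOkB_no345 _ hall')]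
          have hBl' : pvB ('1' :: pvMap345 x :: s.reverse) = '1' :: pvMap345 x :: s.reverse := by
            simp [pvB, pvGo_no345 _ hall']
          have hBl : pvB l = '1' :: pvMap345 x :: s.reverse := by
            rw [hl]
            simp [pvB, pvGo, pvGo_no345 _ hsr, hxstep]
          rw [hBl', hBl]
      | cons c rr =>
        have hl2 : l = rr.reverse ++ [c] ++ (x :: s.reverse) := by
          simpa [List.reverse_cons] using hl
        -- ok(l) forces result[i-1] to be a digit
        have hokl := hok
        rw [hl2, List.append_assoc, pvOkB_append] at hokl
        have hctail : [c] ++ (x :: s.reverse) = c :: x :: s.reverse := rfl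
        rw [hctail] at hokl
        simp only [Bool.and_eq_true] at hokl
        obtain ⟨hokp, hoktail⟩ := hokl
        have hoktail' := hoktail
        simp only [pvOkB, hcx, Bool.not_true, Bool.or_false, Bool.and_eq_true] at hoktail'
        obtain ⟨hdc, hokxs⟩ := hoktail'
        obtain ⟨hoc', hK, hKc, hKd, hKcnt, hKphi⟩ := pvDigitFacts c hdc
        simp only [pvMkRes, hoc', List.append_nil] at hr
        cases hr' : r with
        | none => rw [hr'] at hr; cases hr
        | some l' =>
          rw [hr'] at hr
          obtain rfl := Option.some.inj hr
          set v : Int := (c.toNat : Int) - 48 with hv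
          set t : List Char := PySem.Int.toChars (v + 1) with ht
          set m : Char := pvMap345 x with hm
          set sr : List Char := s.reverse with hsrdef
          set p : List Char := rr.reverse with hp
          -- no-3/4/5 facts for m :: sr
          have hmsr : ∀ ch ∈ (m :: sr), pvIs345 ch = false := by
            intro ch hch
            rcases List.mem_cons.mp hch with rfl | hch'
            · exact hm345
            · exact hsr ch hch'
          -- carry into the prefix p is the same on both sides
          have hcl : pvCarryB (c :: x :: sr) false = pvCarryB [c] true := by
            have : (c :: x :: sr) = [c] ++ (x :: sr) := rfl
            rw [this, pvCarryB_append, hcx]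
          have hcr : pvCarryB (t ++ m :: sr) false = pvCarryB [c] true := by
            rw [pvCarryB_append, pvCarryB_no345 _ hmsr, hKc]
          -- ok(l')
          have hok' : pvOkB (p ++ (t ++ m :: sr)) false = true := by
            have h2 : pvOkB (t ++ m :: sr) false = true := by
              rw [pvOkB_append, pvCarryB_no345 _ hmsr, pvOkB_digits t false (fun d hd => List.all_eq_true.mp hKd d hd),
                pvOkB_no345 _ hmsr]
              rfl
            have hokp' : pvOkB p (pvCarryB [c] true) = true := by
              rw [← hcl]; exact hokp
            rw [pvOkB_append, hcr, h2, hokp']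
            rfl
          -- the measure decreases
          have hsplit : (c :: x :: sr) = [c] ++ (x :: sr) := rfl
          have c3 : pvCnt (x :: sr) = 1 := by
            rw [pvCnt_cons, hx, pvCnt_no345 _ hsr]
            simp
          have hlt : pvPhi (p ++ (t ++ m :: sr)) < pvPhi l := by
            have cphi_xsr : pvPhi (x :: sr) = 1 := by
              show pvCnt (x :: sr) + pvPhi sr = 1
              rw [c3, pvPhi_no345 _ hsr]
            have cphi_c : pvPhi [c] = pvCnt [c] := by
              show pvCnt [c] + pvPhi [] = pvCnt [c]
              simp [pvPhi]
            have c1 : pvCnt (c :: x :: sr) = pvCnt [c] + 1 := by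
              rw [hsplit, pvCnt_append, c3]
            have c2 : pvPhi (c :: x :: sr) = pvCnt [c] + 2 := by
              rw [hsplit, pvPhi_append, cphi_c, cphi_xsr, c3]
              simp
            have e1 : pvPhi l = pvPhi p + p.length * (pvCnt [c] + 1) + (pvCnt [c] + 2) := by
              rw [hl2, List.append_assoc, hctail, pvPhi_append, c1, c2]
            have e2 : pvPhi (p ++ (t ++ m :: sr)) = pvPhi p + p.length * pvCnt t + pvPhi t := by
              rw [pvPhi_append, pvCnt_append, pvCnt_no345 _ hmsr, pvPhi_append,
                pvCnt_no345 _ hmsr, pvPhi_no345 _ hmsr]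
              ring
            have hLe : p.length * pvCnt t ≤ p.length * (pvCnt [c] + 1) :=
              Nat.mul_le_mul_left _ (by omega)
            rw [e1, e2]
            linarith [hKphi]
          rw [show (p ++ t ++ m :: sr) = p ++ (t ++ m :: sr) from
            List.append_assoc p t (m :: sr)]
          show (if _h : pvPhi (p ++ (t ++ m :: sr)) < pvPhi l then
              pvARec (p ++ (t ++ m :: sr)) else none) = some (pvB l)
          rw [dif_pos hlt, IH (pvPhi (p ++ (t ++ m :: sr))) (by omega) _ rfl hok']
          -- both passes produce the same characters
          have hgo : pvGo l 0 = pvGo (p ++ (t ++ m :: sr)) 0 := by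
            have g1 : pvGo (c :: x :: sr) 0 =
                ((pvStep1 c 1).1 ++ ([m] ++ sr), (pvStep1 c 1).2) := by
              simp [pvGo, pvGo_no345 _ hsr, hxstep]
            have g2 : pvGo (t ++ m :: sr) 0 =
                ((pvStep1 c 1).1 ++ ([m] ++ sr), (pvStep1 c 1).2) := by
              rw [pvGo_append, pvGo_no345 _ hmsr]
              simp only [hK]
              rfl
            rw [hl2, List.append_assoc, hctail, pvGo_append, g1, pvGo_append, g2]
          rw [show pvB (p ++ (t ++ m :: sr)) = pvB l by simp [pvB, hgo]]

-- ===== VERDICT (by name: the statement is the Claim_ definition above) =====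
theorem replace_with_snafu_special_chars_spec : Claim_equal_replace_with_snafu_special_chars := by
  intro number _hdom hpre
  unfold Spec_replace_with_snafu_special_chars
  unfold replace_with_snafu_special_chars
  rw [pvMain (pvPhi number.toList) number.toList rfl hpre, pvAlt_eq]
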